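-- pv_equiv track=rewrite | github.com/Chaooz/adventofcode | Libs/advent_libs_list.py | max_point_in_list
-- ===== SOURCE A (Python) =====
-- def max_point_in_list(point_list):
--     max_x = 0
--     max_y = 0
--     for input in point_list:
--         x = int(input[0])
--         y = int(input[1])
--         if x > max_x:
--             max_x = x
--         if y > max_y:
--             max_y = y
--     return (max_x, max_y)
-- ===== SOURCE B (Python) =====
-- def max_point_in_list(point_list):
--     # divide-and-conquer: split the list in halves, combine componentwise maxima
--     if not point_list:
--         return (0, 0)
--     if len(point_list) == 1:
--         p = point_list[0]
--         return (max(0, int(p[0])), max(0, int(p[1])))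
--     mid = len(point_list) // 2
--     lx, ly = max_point_in_list(point_list[:mid])
--     rx, ry = max_point_in_list(point_list[mid:])
--     return (max(lx, rx), max(ly, ry))
-- ===== Notes on version B (the rewrite author's own statement) =====
-- stated objective: alternative
-- what changed: Replaces A's single left-to-right accumulator loop with a recursive divide-and-conquer: split the list in halves, recursively compute each half's 0-floored componentwise maximum, and merge the two results with max.
import Mathlib
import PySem

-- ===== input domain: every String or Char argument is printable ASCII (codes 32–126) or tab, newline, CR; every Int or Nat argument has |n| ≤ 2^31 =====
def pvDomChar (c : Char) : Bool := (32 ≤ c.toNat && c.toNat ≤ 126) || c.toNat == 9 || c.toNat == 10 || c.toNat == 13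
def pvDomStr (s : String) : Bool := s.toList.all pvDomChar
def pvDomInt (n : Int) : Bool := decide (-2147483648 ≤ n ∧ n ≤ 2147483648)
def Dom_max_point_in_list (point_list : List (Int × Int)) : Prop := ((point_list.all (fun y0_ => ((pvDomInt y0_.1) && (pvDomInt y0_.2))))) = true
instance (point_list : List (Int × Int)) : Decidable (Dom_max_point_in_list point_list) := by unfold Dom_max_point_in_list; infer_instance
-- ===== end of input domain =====

-- B replaces A's single accumulator loop with a divide-and-conquer recursion on list halves (objective: alternative).


-- ===== PORT A =====
-- A: one loop over the points, updating max_x and max_y with separate if-tests.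
def max_point_in_list (point_list : List (Int × Int)) : Int × Int :=
  let s := point_list.foldl
    (fun s input =>
      let x := input.1
      let y := input.2
      let max_x := if x > s.1 then x else s.1
      let max_y := if y > s.2 then y else s.2
      (max_x, max_y))
    (0, 0)
  (s.1, s.2)

-- ===== PORT B =====
-- B: divide-and-conquer on list halves (point_list[:mid] / point_list[mid:] = take/drop).
def max_point_in_list_alt (point_list : List (Int × Int)) : Int × Int :=
  match h : point_list with
  | [] => (0, 0)
  | [p] => (max 0 p.1, max 0 p.2)
  | _ :: _ :: _ =>
    let mid := point_list.length / 2
    let l := max_point_in_list_alt (point_list.take mid)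
    let r := max_point_in_list_alt (point_list.drop mid)
    (max l.1 r.1, max l.2 r.2)
  termination_by point_list.length
  decreasing_by
    · simp_all; omega
    · simp_all; omega

-- ===== PRECONDITION & SPEC =====
def Spec_max_point_in_list (point_list : List (Int × Int)) (out : Int × Int) : Prop := out = max_point_in_list_alt point_list
instance (point_list : List (Int × Int)) (out : Int × Int) : Decidable (Spec_max_point_in_list point_list out) := by unfold Spec_max_point_in_list; infer_instance

-- ===== CLAIM (what is proved, stated in full; the proofs are below) =====
def Claim_equal_max_point_in_list : Prop := ∀ (point_list : List (Int × Int)), Dom_max_point_in_list point_list → Spec_max_point_in_list point_list (max_point_in_list point_list)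

-- ===== LEMMAS AND PROOFS =====
theorem if_gt_eq_max (a b : Int) : (if b > a then b else a) = max a b := by
  split <;> omega

theorem max_foldl_max (l : List Int) : ∀ a b : Int, max a (l.foldl max b) = l.foldl max (max a b) := by
  induction l with
  | nil => intro a b; simp
  | cons h t ih =>
    intro a b
    simp only [List.foldl_cons, ih]
    congr 1
    omega

theorem foldl_max_nonneg (l : List Int) : ∀ a : Int, 0 ≤ a → 0 ≤ l.foldl max a := by
  induction l with
  | nil => intro a h; simpa using h
  | cons h t ih => intro a ha; exact ih _ (le_trans ha (le_max_left _ _))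

theorem foldl_max_append (l₁ l₂ : List Int) :
    max (l₁.foldl max 0) (l₂.foldl max 0) = (l₁ ++ l₂).foldl max 0 := by
  rw [List.foldl_append, max_foldl_max]
  congr 1
  have := foldl_max_nonneg l₁ 0 le_rfl
  omega

theorem foldA_eq (l : List (Int × Int)) : ∀ mx my : Int,
    l.foldl (fun s input =>
      (if input.1 > s.1 then input.1 else s.1, if input.2 > s.2 then input.2 else s.2)) (mx, my)
    = ((l.map (fun p => p.1)).foldl max mx, (l.map (fun p => p.2)).foldl max my) := by
  induction l with
  | nil => intro mx my; rfl
  | cons h t ih =>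
    intro mx my
    rw [List.foldl_cons, ih]
    simp [if_gt_eq_max]

theorem alt_eq_fold (l : List (Int × Int)) :
    max_point_in_list_alt l
      = ((l.map (fun p => p.1)).foldl max 0, (l.map (fun p => p.2)).foldl max 0) := by
  induction l using max_point_in_list_alt.induct with
  | case1 => simp [max_point_in_list_alt]
  | case2 p => simp [max_point_in_list_alt]
  | case3 p q t mid hl hr =>
    rw [max_point_in_list_alt]
    rw [hl, hr]
    have hx := foldl_max_append (((p :: q :: t).take (mid)).map (fun p => p.1))
      (((p :: q :: t).drop (mid)).map (fun p => p.1))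
    have hy := foldl_max_append (((p :: q :: t).take (mid)).map (fun p => p.2))
      (((p :: q :: t).drop (mid)).map (fun p => p.2))
    rw [← List.map_append, List.take_append_drop] at hx hy
    simp only [Prod.mk.injEq, List.map_cons, List.foldl_cons]
    simp only [List.map_cons, List.foldl_cons] at hx hy
    exact ⟨hx, hy⟩

-- ===== VERDICT (by name: the statement is the Claim_ definition above) =====
theorem max_point_in_list_spec : Claim_equal_max_point_in_list := by
  intro l _
  show max_point_in_list l = max_point_in_list_alt l
  simp only [max_point_in_list, foldA_eq, alt_eq_fold]
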